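-- pv_equiv track=rewrite | github.com/mithun50/TreeDex | treedex/tree_builder.py | repair_orphans
-- ===== SOURCE A (Python) =====
-- def repair_orphans(flat_list: list[dict]) -> list[dict]:
--     """Repair orphaned sections by inserting synthetic parent nodes.
--
--     If ``"2.3.1"`` exists but ``"2.3"`` doesn't, a synthetic ``"2.3"`` node
--     is inserted so that ``list_to_tree`` can build the correct hierarchy.
--     """
--     known = {item["structure"] for item in flat_list}
--     inserts: list[dict] = []
--
--     for item in flat_list:
--         parts = item["structure"].split(".")
--         for depth in range(1, len(parts)):
--             ancestor = ".".join(parts[:depth])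
--             if ancestor not in known:
--                 inserts.append({
--                     "structure": ancestor,
--                     "title": f"Section {ancestor}",
--                     "physical_index": item["physical_index"],
--                 })
--                 known.add(ancestor)
--
--     if inserts:
--         combined = flat_list + inserts
--         combined.sort(key=lambda x: [int(p) for p in x["structure"].split(".")])
--         return combined
--
--     return flat_list
-- ===== SOURCE B (Python) =====
-- def repair_orphans(flat_list: list[dict]) -> list[dict]:
--     """Repair orphaned sections by inserting synthetic parent nodes.
--
--     Level-order (breadth-first) repair: instead of walking each record's
--     ancestor chain, sweep the whole collection one depth level at a time,
--     recording for every missing ancestor the position of the first record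
--     that requires it; synthetic nodes are then ordered by that first
--     requirement (position, then depth) and merged by one final sort.
--     """
--     known = {item["structure"] for item in flat_list}
--     parts_list = [item["structure"].split(".") for item in flat_list]
--     found = {}  # ancestor -> (pos, depth, physical_index) of first requirement
--     max_len = max((len(ps) for ps in parts_list), default=0)
--     for depth in range(1, max_len):
--         for pos, (ps, item) in enumerate(zip(parts_list, flat_list)):
--             if depth < len(ps):
--                 anc = ".".join(ps[:depth])
--                 if anc not in known and anc not in found:
--                     found[anc] = (pos, depth, item["physical_index"])
--     if not found:
--         return flat_list
--     synthetic = [{"structure": anc, "title": f"Section {anc}", "physical_index": pi}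
--                  for anc, (pos, d, pi)
--                  in sorted(found.items(), key=lambda kv: [kv[1][0], kv[1][1]])]
--     return sorted(flat_list + synthetic,
--                   key=lambda x: [int(p) for p in x["structure"].split(".")])
-- ===== Notes on version B (the rewrite author's own statement) =====
-- stated objective: alternative
-- what changed: A walks each record's ancestor chain record by record, appending synthetic nodes inline against a growing known-set; B sweeps the collection level by level (one pass per depth over all records, breadth-first), records for each missing ancestor the first position requiring it in a dict, orders the synthetic nodes by that (position, depth) and merges with one final sort.
import Mathlib
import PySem

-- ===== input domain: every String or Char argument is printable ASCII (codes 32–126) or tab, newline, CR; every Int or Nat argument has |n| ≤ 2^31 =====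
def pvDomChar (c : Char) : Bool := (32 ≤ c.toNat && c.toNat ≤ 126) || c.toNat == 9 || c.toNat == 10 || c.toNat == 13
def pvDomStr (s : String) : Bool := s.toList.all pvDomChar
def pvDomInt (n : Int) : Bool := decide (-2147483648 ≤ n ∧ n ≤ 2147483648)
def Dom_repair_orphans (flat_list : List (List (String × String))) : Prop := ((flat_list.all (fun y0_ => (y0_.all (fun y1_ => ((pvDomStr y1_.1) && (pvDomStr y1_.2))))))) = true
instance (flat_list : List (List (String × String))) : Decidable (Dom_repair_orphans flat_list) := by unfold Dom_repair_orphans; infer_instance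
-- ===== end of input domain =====

-- B replaces A's record-by-record ancestor walk (growing known set, inserts appended inline) by a level-order
-- sweep: one pass per depth level over the whole collection, recording for each missing ancestor the first
-- record position that requires it, then ordering the synthetic nodes by that (position, depth) and merging
-- with one final sort; same return value (objective: alternative, no speed claim).
-- A mutates no argument: `combined = flat_list + inserts` is a fresh list (`flat_list` itself is returned only unchanged).

-- ===== PORT A =====
-- item[k] (Python dict lookup; Pre_ guarantees the key is present, "" is the total default)
def pvGet (item : List (String × String)) (k : String) : String :=
  (PySem.Dict.mk item).getD k ""

-- s.split("."): the separator is nonempty, so split? is always `some`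
def pvParts (s : String) : List String :=
  (PySem.Str.split? s ".").getD []

-- the sort key  lambda x: [int(p) for p in x["structure"].split(".")]  (Pre_ makes every int() succeed)
def pvSortKey (x : List (String × String)) : List Int :=
  (pvParts (pvGet x "structure")).map (fun p => (PySem.Int.ofStr? p).getD 0)

def repair_orphans (flat_list : List (List (String × String))) : List (List (String × String)) :=
  let known : PySem.Set String :=
    PySem.Set.ofList (flat_list.map (fun item => pvGet item "structure"))
  let st : List (List (String × String)) × PySem.Set String :=
    flat_list.foldl (fun st item =>
      let parts := pvParts (pvGet item "structure")
      (PySem.List.pyRange 1 parts.length 1).foldl (fun st depth =>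
        let ancestor := PySem.Str.join "." (parts.take depth.toNat)
        if st.2.contains ancestor then st
        else (st.1 ++ [[("structure", ancestor), ("title", "Section " ++ ancestor),
                        ("physical_index", pvGet item "physical_index")]],
              st.2.add ancestor)) st) ([], known)
  if st.1.isEmpty then flat_list
  else PySem.List.sorted (flat_list ++ st.1) pvSortKey false

-- ===== PORT B =====
def repair_orphans_alt (flat_list : List (List (String × String))) : List (List (String × String)) :=
  let known : PySem.Set String :=
    PySem.Set.ofList (flat_list.map (fun item => pvGet item "structure"))
  let parts_list : List (List String) :=
    flat_list.map (fun item => pvParts (pvGet item "structure"))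
  let max_len : Int :=
    PySem.List.maxD (parts_list.map (fun ps => (ps.length : Int))) (fun n => n) 0
  let found : PySem.Dict String (Int × Int × String) :=
    (PySem.List.pyRange 1 max_len 1).foldl (fun found depth =>
      (PySem.List.enumerate (parts_list.zip flat_list)).foldl (fun found e =>
        if depth < (e.2.1.length : Int) then
          let anc := PySem.Str.join "." (e.2.1.take depth.toNat)
          if !(known.contains anc) && !(found.contains anc)
          then found.insert anc (e.1, depth, pvGet e.2.2 "physical_index")
          else found
        else found) found) PySem.Dict.empty
  if found.size == 0 then flat_list
  else
    let synthetic :=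
      (PySem.List.sorted found.items (fun kv => [kv.2.1, kv.2.2.1]) false).map
        (fun kv => [("structure", kv.1), ("title", "Section " ++ kv.1),
                    ("physical_index", kv.2.2.2)])
    PySem.List.sorted (flat_list ++ synthetic) pvSortKey false

-- ===== PRECONDITION & SPEC =====
-- Helpers for Pre_: an item's structure string and its proper dotted prefixes (one per '.').
def pvStruct (item : List (String × String)) : String := pvGet item "structure"

def pvPrefixes (s : String) : List String :=
  (List.range s.toList.length).filterMap (fun i =>
    if s.toList[i]? = some '.' then some (String.ofList (s.toList.take i)) else none)

def pvKnown (flat_list : List (List (String × String))) : List String :=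
  flat_list.map pvStruct

def pvOrphaned (flat_list : List (List (String × String))) (item : List (String × String)) : Prop :=
  ∃ a ∈ pvPrefixes (pvStruct item), a ∉ pvKnown flat_list

-- Pre_ excludes inputs where Python A raises: an item without a "structure" key (KeyError); and, when a
-- missing ancestor exists, a structure piece int() rejects (ValueError in the sort key) or an insert-raising
-- item without a "physical_index" key (KeyError).  It also excludes one kind of input A still returns on,
-- given in the claim's cite: slightly wider than A's evolving `known` set, it demands a "physical_index"
-- key for EVERY orphaned item, even one whose missing ancestors were already inserted for an earlier item.
-- (The Nodup-keys clause only rules out association lists no Python dict literal can represent.)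
def Pre_repair_orphans (flat_list : List (List (String × String))) : Prop :=
  (∀ item ∈ flat_list, (item.map Prod.fst).Nodup ∧ (PySem.Dict.mk item).contains "structure" = true) ∧
  ((∃ item ∈ flat_list, pvOrphaned flat_list item) →
    ∀ item ∈ flat_list,
      (∀ p ∈ pvParts (pvStruct item), (PySem.Int.ofStr? p).isSome) ∧
      (pvOrphaned flat_list item → (PySem.Dict.mk item).contains "physical_index" = true))
instance (flat_list : List (List (String × String))) : Decidable (Pre_repair_orphans flat_list) := by
  unfold Pre_repair_orphans pvOrphaned; infer_instance

def pvWitness_repair_orphans : (List (List (String × String))) :=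
  [[("structure", "2.3.1"), ("title", "T"), ("physical_index", "7")],
   [("structure", "2"), ("physical_index", "1")]]

def Spec_repair_orphans (flat_list : List (List (String × String))) (out : List (List (String × String))) : Prop := out = repair_orphans_alt flat_list
instance (flat_list : List (List (String × String))) (out : List (List (String × String))) : Decidable (Spec_repair_orphans flat_list out) := by unfold Spec_repair_orphans; infer_instance

-- ===== CLAIM (what is proved, stated in full; the proofs are below) =====
def Claim_equal_repair_orphans : Prop := ∀ (flat_list : List (List (String × String))), Dom_repair_orphans flat_list → Pre_repair_orphans flat_list → Spec_repair_orphans flat_list (repair_orphans flat_list)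

-- ===== LEMMAS AND PROOFS =====

-- An "occurrence": (ancestor string, record position, depth, physical_index of the record).
abbrev pvOcc : Type := String × Int × Int × String

-- The synthetic node an occurrence produces.
def pvNodeO (o : pvOcc) : List (String × String) :=
  [("structure", o.1), ("title", "Section " ++ o.1), ("physical_index", o.2.2.2)]

-- Cell (pos, d) of the prefix matrix of record `item`.
def pvCell (pos : Int) (item : List (String × String)) (d : Int) : pvOcc :=
  (PySem.Str.join "." ((pvParts (pvGet item "structure")).take d.toNat), pos, d,
   pvGet item "physical_index")

def pvLen (item : List (String × String)) : Int :=
  ((pvParts (pvGet item "structure")).length : Int)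

-- Row-major (A's order) and column-major (B's order) occurrence streams.
def pvRow (pos : Int) (item : List (String × String)) : List pvOcc :=
  (PySem.List.pyRange 1 (pvLen item) 1).map (pvCell pos item)

def pvOccA (fl : List (List (String × String))) : List pvOcc :=
  (PySem.List.enumerate fl).flatMap (fun e => pvRow e.1 e.2)

def pvMaxLen (fl : List (List (String × String))) : Int :=
  PySem.List.maxD ((fl.map (fun item => pvParts (pvGet item "structure"))).map
    (fun ps => (ps.length : Int))) (fun n => n) 0

def pvCol (fl : List (List (String × String))) (d : Int) : List pvOcc :=
  (PySem.List.enumerate fl).flatMap (fun e =>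
    if d < pvLen e.2 then [pvCell e.1 e.2 d] else [])

def pvOccB (fl : List (List (String × String))) : List pvOcc :=
  (PySem.List.pyRange 1 (pvMaxLen fl) 1).flatMap (pvCol fl)

def pvKnown0 (fl : List (List (String × String))) : PySem.Set String :=
  PySem.Set.ofList (fl.map (fun item => pvGet item "structure"))

-- First-wins selection of unseen ancestors from an occurrence stream.
def pvSpecL (seen : PySem.Set String) : List pvOcc → List pvOcc
  | [] => []
  | o :: t => if seen.contains o.1 then pvSpecL seen t
              else o :: pvSpecL (seen.add o.1) t

-- sort key used by B on found.items
def pvKey2 (kv : pvOcc) : List Int := [kv.2.1, kv.2.2.1]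

-- A's per-occurrence step: skip a seen ancestor, else append its node and mark it seen.
def pvStepA (st : List (List (String × String)) × PySem.Set String) (o : pvOcc) :
    List (List (String × String)) × PySem.Set String :=
  if st.2.contains o.1 then st else (st.1 ++ [pvNodeO o], st.2.add o.1)

theorem pvFoldl_enumerate {α β : Type} (g : β → α → β) (l : List α) :
    ∀ (s : Int) (st : β),
      (PySem.List.enumerate l s).foldl (fun st e => g st e.2) st = l.foldl g st := by
  induction l with
  | nil => intro s st; rfl
  | cons x t ih => intro s st; simpa [PySem.List.enumerate] using ih (s + 1) (g st x)

theorem pvOccA_foldl (fl : List (List (String × String)))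
    (st0 : List (List (String × String)) × PySem.Set String) :
    (pvOccA fl).foldl pvStepA st0 =
      fl.foldl (fun st item =>
        (PySem.List.pyRange 1 ((pvParts (pvGet item "structure")).length : Int) 1).foldl
          (fun st depth => pvStepA st (pvCell 0 item depth)) st) st0 := by
  rw [pvOccA, List.foldl_flatMap]
  have h : ∀ (st : List (List (String × String)) × PySem.Set String) (e : Int × List (String × String)),
      (pvRow e.1 e.2).foldl pvStepA st =
        (PySem.List.pyRange 1 ((pvParts (pvGet e.2 "structure")).length : Int) 1).foldl
          (fun st depth => pvStepA st (pvCell 0 e.2 depth)) st := by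
    intro st e
    rw [pvRow, List.foldl_map]
    rfl
  simp only [h]
  exact pvFoldl_enumerate (fun st item =>
    (PySem.List.pyRange 1 ((pvParts (pvGet item "structure")).length : Int) 1).foldl
      (fun st depth => pvStepA st (pvCell 0 item depth)) st) fl 0 st0

theorem pvSpecL_of_foldl_stepA (occ : List pvOcc) :
    ∀ (out : List (List (String × String))) (seen : PySem.Set String),
      (occ.foldl pvStepA (out, seen)).1 = out ++ (pvSpecL seen occ).map pvNodeO := by
  induction occ with
  | nil => intro out seen; simp [pvSpecL]
  | cons o t ih =>
      intro out seen
      rw [List.foldl_cons, pvSpecL]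
      by_cases h : seen.contains o.1
      · rw [if_pos h]
        have : pvStepA (out, seen) o = (out, seen) := by
          simp only [pvStepA]; rw [if_pos h]
        rw [this, ih]
      · rw [if_neg h]
        have : pvStepA (out, seen) o = (out ++ [pvNodeO o], seen.add o.1) := by
          simp only [pvStepA]; rw [if_neg h]
        rw [this, ih]
        simp
  
theorem pvA_norm (fl : List (List (String × String))) :
    repair_orphans fl =
      (if pvSpecL (pvKnown0 fl) (pvOccA fl) = [] then fl
       else PySem.List.sorted (fl ++ (pvSpecL (pvKnown0 fl) (pvOccA fl)).map pvNodeO)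
              pvSortKey false) := by
  have h1 : repair_orphans fl =
      (let st := (pvOccA fl).foldl pvStepA ([], pvKnown0 fl)
       if st.1.isEmpty then fl
       else PySem.List.sorted (fl ++ st.1) pvSortKey false) :=
    congrArg (fun st : List (List (String × String)) × PySem.Set String =>
      if st.1.isEmpty then fl else PySem.List.sorted (fl ++ st.1) pvSortKey false)
      (pvOccA_foldl fl ([], pvKnown0 fl)).symm
  rw [h1]
  show (if ((pvOccA fl).foldl pvStepA ([], pvKnown0 fl)).1.isEmpty then fl else _) = _
  rw [pvSpecL_of_foldl_stepA (pvOccA fl) [] (pvKnown0 fl)]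
  simp only [List.nil_append, List.isEmpty_iff, List.map_eq_nil_iff]

-- B's per-occurrence step on the dict of found ancestors.
def pvStepB (known : PySem.Set String) (m : PySem.Dict String (Int × Int × String)) (o : pvOcc) :
    PySem.Dict String (Int × Int × String) :=
  if !(known.contains o.1) && !(m.contains o.1) then m.insert o.1 o.2 else m

theorem pvInnerB (known : PySem.Set String) (d : Int) :
    ∀ (fl : List (List (String × String))) (s : Int) (m : PySem.Dict String (Int × Int × String)),
      (PySem.List.enumerate ((fl.map (fun item => pvParts (pvGet item "structure"))).zip fl) s).foldl
        (fun found e =>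
          if d < (e.2.1.length : Int) then
            if !(known.contains (PySem.Str.join "." (e.2.1.take d.toNat))) &&
               !(found.contains (PySem.Str.join "." (e.2.1.take d.toNat)))
            then found.insert (PySem.Str.join "." (e.2.1.take d.toNat))
                   (e.1, d, pvGet e.2.2 "physical_index")
            else found
          else found) m =
      ((PySem.List.enumerate fl s).flatMap
        (fun e => if d < pvLen e.2 then [pvCell e.1 e.2 d] else [])).foldl (pvStepB known) m := by
  intro fl
  induction fl with
  | nil => intro s m; rfl
  | cons item t ih =>
      intro s m
      show List.foldl _ _ (PySem.List.enumerate (((item :: t).map _).zip (item :: t)) s) = _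
      rw [List.map_cons, List.zip_cons_cons]
      rw [show PySem.List.enumerate ((pvParts (pvGet item "structure"), item) ::
            ((t.map (fun item => pvParts (pvGet item "structure"))).zip t)) s =
          (s, (pvParts (pvGet item "structure"), item)) ::
            PySem.List.enumerate ((t.map (fun item => pvParts (pvGet item "structure"))).zip t) (s + 1)
          from rfl]
      rw [show PySem.List.enumerate (item :: t) s = (s, item) :: PySem.List.enumerate t (s + 1) from rfl]
      rw [List.foldl_cons, List.flatMap_cons, List.foldl_append]
      by_cases hd : d < pvLen item
      · rw [if_pos hd, if_pos (show d < ((pvParts (pvGet item "structure")).length : Int) from hd)]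
        rw [show List.foldl (pvStepB known) m [pvCell s item d] = pvStepB known m (pvCell s item d)
            from rfl]
        rw [show (if !(known.contains (PySem.Str.join "."
              ((pvParts (pvGet item "structure")).take d.toNat))) &&
              !(m.contains (PySem.Str.join "." ((pvParts (pvGet item "structure")).take d.toNat)))
            then m.insert (PySem.Str.join "." ((pvParts (pvGet item "structure")).take d.toNat))
              (s, d, pvGet item "physical_index") else m) = pvStepB known m (pvCell s item d) from rfl]
        exact ih (s + 1) _
      · rw [if_neg hd, if_neg (show ¬ d < ((pvParts (pvGet item "structure")).length : Int) from hd)]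
        rw [show List.foldl (pvStepB known) m ([] : List pvOcc) = m from rfl]
        exact ih (s + 1) m

-- contains of an updated set
theorem pvContains_update (known : PySem.Set String) (ks : List String) (a : String) :
    (known.update ks).contains a = (known.contains a || decide (a ∈ ks)) := by
  have h1 : ∀ (s : PySem.Set String) (x : String), s.contains x = decide (x ∈ s) := by
    intro s x; simp [PySem.Set.contains]
  rw [h1]
  by_cases hk : a ∈ known <;> by_cases hs : a ∈ ks <;>
    simp [PySem.Set.mem_update, hk, hs]

theorem pvUpdate_append_singleton (known : PySem.Set String) (ks : List String) (k : String) :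
    known.update (ks ++ [k]) = (known.update ks).add k := by
  simp [PySem.Set.update, List.foldl_append]

theorem pvDict_fold_items (known : PySem.Set String) (occ : List pvOcc) :
    ∀ (m : PySem.Dict String (Int × Int × String)),
      (occ.foldl (pvStepB known) m).items =
        m.items ++ pvSpecL (known.update (m.items.map Prod.fst)) occ := by
  induction occ with
  | nil => intro m; simp [pvSpecL]
  | cons o t ih =>
      intro m
      rw [List.foldl_cons, pvSpecL]
      have hc : (known.update (m.items.map Prod.fst)).contains o.1 =
          (known.contains o.1 || m.contains o.1) := by
        rw [pvContains_update]
        congr 1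
        rw [PySem.Dict.contains_eq_decide_mem_keys, PySem.Dict.keys]
      by_cases h : (known.contains o.1 || m.contains o.1) = true
      · rw [hc, if_pos h]
        have hstep : pvStepB known m o = m := by
          simp only [pvStepB]
          have : (!(known.contains o.1) && !(m.contains o.1)) = false := by
            cases hk : known.contains o.1 <;> cases hm : m.contains o.1 <;>
              simp_all
          rw [this]; rfl
        rw [hstep, ih]
      · rw [hc, if_neg h]
        have hk : known.contains o.1 = false := by cases hk : known.contains o.1 <;> simp_all
        have hm : m.contains o.1 = false := by cases hm : m.contains o.1 <;> simp_all
        have hstep : pvStepB known m o = m.insert o.1 o.2 := by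
          simp only [pvStepB, hk, hm]; rfl
        rw [hstep, ih, PySem.Dict.items_insert_of_not_contains m o.2 hm]
        rw [show ((o.1, o.2) : String × Int × Int × String) = o from rfl]
        rw [List.map_append, List.map_cons, List.map_nil, pvUpdate_append_singleton]
        simp

theorem pvB_norm (fl : List (List (String × String))) :
    repair_orphans_alt fl =
      (if pvSpecL (pvKnown0 fl) (pvOccB fl) = [] then fl
       else PySem.List.sorted
              (fl ++ (PySem.List.sorted (pvSpecL (pvKnown0 fl) (pvOccB fl)) pvKey2 false).map pvNodeO)
              pvSortKey false) := by
  have hfold : (PySem.List.pyRange 1 (pvMaxLen fl) 1).foldl (fun found depth =>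
      (PySem.List.enumerate ((fl.map (fun item => pvParts (pvGet item "structure"))).zip fl)).foldl
        (fun found e =>
          if depth < (e.2.1.length : Int) then
            if !((pvKnown0 fl).contains (PySem.Str.join "." (e.2.1.take depth.toNat))) &&
               !(found.contains (PySem.Str.join "." (e.2.1.take depth.toNat)))
            then found.insert (PySem.Str.join "." (e.2.1.take depth.toNat))
                   (e.1, depth, pvGet e.2.2 "physical_index")
            else found
          else found) found) PySem.Dict.empty =
      (pvOccB fl).foldl (pvStepB (pvKnown0 fl)) PySem.Dict.empty := by
    rw [pvOccB, List.foldl_flatMap]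
    refine PySem.List.foldl_congr_mem _ _ _ _ ?_
    intro m d _
    rw [pvInnerB (pvKnown0 fl) d fl 0 m]
    rfl
  have h1 : repair_orphans_alt fl =
      (let found := (pvOccB fl).foldl (pvStepB (pvKnown0 fl)) PySem.Dict.empty
       if found.size == 0 then fl
       else PySem.List.sorted
         (fl ++ (PySem.List.sorted found.items pvKey2 false).map pvNodeO) pvSortKey false) :=
    congrArg (fun found : PySem.Dict String (Int × Int × String) =>
      if found.size == 0 then fl
      else PySem.List.sorted
        (fl ++ (PySem.List.sorted found.items pvKey2 false).map pvNodeO) pvSortKey false) hfold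
  rw [h1]
  show (if ((pvOccB fl).foldl (pvStepB (pvKnown0 fl)) PySem.Dict.empty).size == 0 then fl else _) = _
  have hitems : ((pvOccB fl).foldl (pvStepB (pvKnown0 fl)) PySem.Dict.empty).items =
      pvSpecL (pvKnown0 fl) (pvOccB fl) := by
    rw [pvDict_fold_items]
    rfl
  simp only [PySem.Dict.size, hitems]
  cases hsp : pvSpecL (pvKnown0 fl) (pvOccB fl) <;> simp

theorem pvPyRange_nil (a b : Int) (h : ¬ a < b) : PySem.List.pyRange a b 1 = [] := by
  simp [PySem.List.pyRange]
  omega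

theorem pvPyRange_pairwise (a b : Int) : (PySem.List.pyRange a b 1).Pairwise (· < ·) := by
  have h : ∀ n : Nat, ∀ a b : Int, (b - a).toNat = n →
      (PySem.List.pyRange a b 1).Pairwise (· < ·) := by
    intro n
    induction n with
    | zero =>
        intro a b h
        rw [pvPyRange_nil a b (by omega)]
        exact List.Pairwise.nil
    | succ k ih =>
        intro a b h
        by_cases hlt : a < b
        · rw [PySem.List.pyRange_one_cons hlt]
          refine List.Pairwise.cons ?_ (ih (a+1) b (by omega))
          intro x hx
          have := PySem.List.mem_pyRange_one.mp hx
          omega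
        · rw [pvPyRange_nil a b hlt]
          exact List.Pairwise.nil
  exact h (b - a).toNat a b rfl

theorem pvSetContains (s : PySem.Set String) (x : String) : s.contains x = decide (x ∈ s) := by
  simp [PySem.Set.contains]

theorem pvContains_add (s : PySem.Set String) (x y : String) :
    (s.add x).contains y = (s.contains y || decide (y = x)) := by
  rw [pvSetContains, pvSetContains]
  by_cases h1 : y ∈ s <;> by_cases h2 : y = x <;> simp [PySem.Set.mem_add, h1, h2]

-- Which occurrences survive the first-wins selection: exactly the first occurrence
-- of each ancestor not already in `seen`.
theorem pvSpecL_mem (occ : List pvOcc) : ∀ (seen : PySem.Set String) (o : pvOcc),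
    o ∈ pvSpecL seen occ ↔
      seen.contains o.1 = false ∧ (occ.filter (fun x => x.1 == o.1)).head? = some o := by
  induction occ with
  | nil => intro seen o; simp [pvSpecL]
  | cons x t ih =>
      intro seen o
      rw [pvSpecL]
      by_cases hx : seen.contains x.1 = true
      · rw [if_pos hx]
        by_cases hxo : x.1 = o.1
        · have hco : seen.contains o.1 = true := hxo ▸ hx
          rw [ih seen o, hco]
          exact iff_of_false (fun h => by cases h.1) (fun h => by cases h.1)
        · have hb : (x.1 == o.1) = false := by simp [hxo]
          rw [ih seen o, List.filter_cons, hb]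
          exact Iff.rfl
      · rw [if_neg hx]
        have hxf : seen.contains x.1 = false := by
          cases h : seen.contains x.1
          · rfl
          · exact absurd h hx
        by_cases hox : o = x
        · subst hox
          have hb : (o.1 == o.1) = true := by simp
          rw [List.filter_cons, hb, if_pos rfl, List.head?_cons]
          exact iff_of_true (List.mem_cons_self) ⟨hxf, rfl⟩
        · rw [List.mem_cons]
          simp only [hox, false_or]
          rw [ih (seen.add x.1) o, pvContains_add]
          by_cases hxo : x.1 = o.1
          · have hd : decide (o.1 = x.1) = true := by simp [hxo.symm]
            have hb : (x.1 == o.1) = true := by simp [hxo]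
            rw [List.filter_cons, hb, hd, if_pos rfl, List.head?_cons]
            rw [Bool.or_true]
            refine iff_of_false (fun h => by cases h.1) (fun h => ?_)
            exact hox (Eq.symm (Option.some.inj h.2))
          · have hd : decide (o.1 = x.1) = false := by simp [Ne.symm hxo]
            have hb : (x.1 == o.1) = false := by simp [hxo]
            rw [List.filter_cons, hb, hd, if_neg (by decide), Bool.or_false]

theorem pvSpecL_fst_nodup (occ : List pvOcc) :
    ∀ seen : PySem.Set String, ((pvSpecL seen occ).map (fun o => o.1)).Nodup := by
  induction occ with
  | nil => intro seen; simp [pvSpecL]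
  | cons x t ih =>
      intro seen
      rw [pvSpecL]
      by_cases hx : seen.contains x.1 = true
      · rw [if_pos hx]; exact ih seen
      · rw [if_neg hx]
        rw [List.map_cons, List.nodup_cons]
        refine ⟨?_, ih (seen.add x.1)⟩
        intro hmem
        obtain ⟨o, ho, hfst⟩ := List.mem_map.mp hmem
        have h1 := ((pvSpecL_mem t (seen.add x.1) o).mp ho).1
        rw [pvContains_add] at h1
        simp [hfst] at h1
  
theorem pvSpecL_nodup (occ : List pvOcc) (seen : PySem.Set String) :
    (pvSpecL seen occ).Nodup :=
  List.Nodup.of_map _ (pvSpecL_fst_nodup occ seen)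

-- Pieces produced by str.split(".") never contain the separator.
theorem pvSplitGo_dotfree : ∀ (fuel : Nat) (l cur : List Char) (acc : List (List Char)),
    l.length < fuel → '.' ∉ cur → (∀ p ∈ acc, '.' ∉ p) →
    ∀ p ∈ PySem.Chars.splitOn.go ['.'] fuel l cur acc, '.' ∉ p := by
  intro fuel
  induction fuel with
  | zero => intro l cur acc h; omega
  | succ k ih =>
      intro l cur acc hlen hcur hacc p hp
      cases l with
      | nil =>
          rw [show PySem.Chars.splitOn.go ['.'] (k+1) [] cur acc = (cur.reverse :: acc).reverse
              from rfl] at hp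
          rw [List.mem_reverse, List.mem_cons] at hp
          rcases hp with hp | hp
          · subst hp; rw [List.mem_reverse]; exact hcur
          · exact hacc p hp
      | cons c rest =>
          rw [show PySem.Chars.splitOn.go ['.'] (k+1) (c :: rest) cur acc =
              (if List.isPrefixOf ['.'] (c :: rest) then
                 PySem.Chars.splitOn.go ['.'] k (List.drop (List.length ['.']) (c :: rest)) []
                   (cur.reverse :: acc)
               else PySem.Chars.splitOn.go ['.'] k rest (c :: cur) acc) from rfl] at hp
          by_cases hpre : List.isPrefixOf ['.'] (c :: rest) = true
          · rw [if_pos hpre] at hp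
            refine ih rest [] (cur.reverse :: acc) (by simp at hlen ⊢; omega) (by simp) ?_ p hp
            intro q hq
            rw [List.mem_cons] at hq
            rcases hq with hq | hq
            · subst hq; rw [List.mem_reverse]; exact hcur
            · exact hacc q hq
          · rw [if_neg hpre] at hp
            have hc : c ≠ '.' := by
              intro hc; subst hc
              exact hpre (by simp [List.isPrefixOf])
            refine ih rest (c :: cur) acc (by simp at hlen ⊢; omega) ?_ hacc p hp
            intro hmem
            rw [List.mem_cons] at hmem
            rcases hmem with hmem | hmem
            · exact hc hmem.symm
            · exact hcur hmem

theorem pvParts_toList (s : String) :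
    (pvParts s).map String.toList = PySem.Chars.splitOn s.toList ['.'] := by
  have h := PySem.Str.split?_map s "."
  rw [PySem.Chars.split?.eq_1] at h
  rw [show String.toList "." = ['.'] from rfl] at h
  rw [if_neg (by decide)] at h
  rw [pvParts]
  cases hs : PySem.Str.split? s "." with
  | none => rw [hs] at h; cases h
  | some ps => rw [hs] at h; exact Option.some.inj h

theorem pvParts_dotfree (s : String) : ∀ p ∈ pvParts s, '.' ∉ p.toList := by
  intro p hp
  have hmem : p.toList ∈ (pvParts s).map String.toList := List.mem_map_of_mem hp
  rw [pvParts_toList, PySem.Chars.splitOn] at hmem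
  exact pvSplitGo_dotfree (s.toList.length + 1) s.toList [] [] (by omega) (by simp) (by simp)
    p.toList hmem

-- joining n dot-free pieces with "." yields exactly n-1 dots
theorem pvCount_cjoin : ∀ (ps : List (List Char)), ps ≠ [] → (∀ p ∈ ps, '.' ∉ p) →
    (PySem.Chars.join ['.'] ps).count '.' = ps.length - 1 := by
  intro ps
  induction ps with
  | nil => intro h; exact absurd rfl h
  | cons p t ih =>
      intro _ hfree
      cases t with
      | nil =>
          rw [PySem.Chars.join_singleton]
          simp [List.count_eq_zero]
          exact hfree p (by simp)
      | cons q r =>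
          rw [PySem.Chars.join_cons_cons, List.count_append, List.count_append]
          have h1 : p.count '.' = 0 := List.count_eq_zero.mpr (hfree p (by simp))
          have h2 : List.count '.' ['.'] = 1 := by decide
          have h3 := ih (by simp) (fun x hx => hfree x (List.mem_cons_of_mem p hx))
          rw [h1, h2, h3]
          simp
          omega

theorem pvCount_join (ps : List String) (h : ps ≠ []) (hfree : ∀ p ∈ ps, '.' ∉ p.toList) :
    (PySem.Str.join "." ps).toList.count '.' = ps.length - 1 := by
  rw [PySem.Str.toList_join, show String.toList "." = ['.'] from rfl]
  rw [pvCount_cjoin (ps.map String.toList) (by simpa using h) ?_]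
  · simp
  · intro p hp
    obtain ⟨q, hq, rfl⟩ := List.mem_map.mp hp
    exact hfree q hq

theorem pvCell_dots (pos : Int) (item : List (String × String)) (d : Int)
    (h1 : 1 ≤ d) (h2 : d ≤ pvLen item) :
    (((pvCell pos item d).1.toList.count '.' : Int)) = d - 1 := by
  have hlen : ((pvParts (pvGet item "structure")).take d.toNat).length = d.toNat := by
    rw [List.length_take]
    rw [pvLen] at h2
    omega
  have hne : (pvParts (pvGet item "structure")).take d.toNat ≠ [] := by
    intro hc
    rw [hc] at hlen
    simp at hlen
    omega
  have hfree : ∀ p ∈ (pvParts (pvGet item "structure")).take d.toNat, '.' ∉ p.toList :=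
    fun p hp => pvParts_dotfree _ p (List.take_subset _ _ hp)
  show (((PySem.Str.join "." ((pvParts (pvGet item "structure")).take d.toNat)).toList.count '.' : Int)) = d - 1
  rw [pvCount_join _ hne hfree, hlen]
  omega

theorem pvCell_eq_depth (pos : Int) (item : List (String × String)) (d : Int) (a : String)
    (h1 : 1 ≤ d) (h2 : d ≤ pvLen item) (h : (pvCell pos item d).1 = a) :
    d = (a.toList.count '.' : Int) + 1 := by
  have := pvCell_dots pos item d h1 h2
  rw [h] at this
  omega

theorem pvFilter_map_single {α : Type} (f : Int → α) (p : α → Bool) (D : Int) :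
    ∀ (l : List Int), (∀ d ∈ l, p (f d) = true → d = D) → l.Nodup →
    (l.map f).filter p = if D ∈ l ∧ p (f D) = true then [f D] else [] := by
  intro l
  induction l with
  | nil => intro _ _; simp
  | cons d t ih =>
      intro hD hn
      rw [List.nodup_cons] at hn
      rw [List.map_cons, List.filter_cons]
      by_cases hp : p (f d) = true
      · have hdD : d = D := hD d (by simp) hp
        subst hdD
        rw [if_pos hp]
        have ht : (t.map f).filter p = [] := by
          rw [List.filter_eq_nil_iff]
          intro x hx hpx
          obtain ⟨d', hd', rfl⟩ := List.mem_map.mp hx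
          exact hn.1 ((hD d' (List.mem_cons_of_mem _ hd') hpx) ▸ hd')
        rw [ht, if_pos ⟨List.mem_cons_self, hp⟩]
      · have hpf : p (f d) = false := by cases h : p (f d); rfl; exact absurd h hp
        rw [hpf, if_neg (by decide)]
        rw [ih (fun x hx => hD x (List.mem_cons_of_mem _ hx)) hn.2]
        by_cases hDd : D = d
        · subst hDd
          rw [if_neg (fun hc => hp hc.2), if_neg (fun hc => hp hc.2)]
        · by_cases hDt : D ∈ t ∧ p (f D) = true
          · rw [if_pos hDt, if_pos ⟨List.mem_cons_of_mem _ hDt.1, hDt.2⟩]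
          · rw [if_neg hDt,
                if_neg (fun hc => hDt ⟨(List.mem_cons.mp hc.1).resolve_left hDd, hc.2⟩)]

theorem pvFlatMap_single {α : Type} (G : List α) (D : Int) :
    ∀ (l : List Int), l.Nodup →
    (l.flatMap (fun d => if d = D then G else [])) = if D ∈ l then G else [] := by
  intro l
  induction l with
  | nil => intro _; simp
  | cons d t ih =>
      intro hn
      rw [List.nodup_cons] at hn
      rw [List.flatMap_cons, ih hn.2]
      by_cases hdD : d = D
      · subst hdD
        rw [if_pos rfl, if_neg (fun hc => hn.1 hc), if_pos (by simp)]
        simp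
      · rw [if_neg hdD]
        by_cases hDt : D ∈ t
        · rw [if_pos hDt, if_pos (List.mem_cons_of_mem _ hDt)]
          simp
        · rw [if_neg hDt, if_neg ?_]
          · simp
          · intro hc
            rcases List.mem_cons.mp hc with h | h
            · exact hdD h.symm
            · exact hDt h

theorem pvLen_le_maxLen (fl : List (List (String × String))) (item : List (String × String))
    (h : item ∈ fl) : pvLen item ≤ pvMaxLen fl := by
  rw [pvMaxLen, PySem.List.maxD]
  have hmem : pvLen item ∈ (fl.map (fun item => pvParts (pvGet item "structure"))).map
      (fun ps => (ps.length : Int)) := by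
    rw [List.map_map]
    exact List.mem_map_of_mem h
  cases hm : PySem.List.max? ((fl.map (fun item => pvParts (pvGet item "structure"))).map
      (fun ps => (ps.length : Int))) (fun n => n) with
  | none =>
      rw [PySem.List.max?_eq_none_iff] at hm
      rw [hm] at hmem
      cases hmem
  | some m =>
      have := PySem.List.max?_isMax hm _ hmem
      simpa using this

theorem pvFilter_occ (fl : List (List (String × String))) (a : String) :
    (pvOccA fl).filter (fun x => x.1 == a) = (pvOccB fl).filter (fun x => x.1 == a) := by
  obtain ⟨D, hDdef⟩ : ∃ D : Int, D = (a.toList.count '.' : Int) + 1 := ⟨_, rfl⟩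
  have hD1 : 1 ≤ D := by omega
  -- the common value: for each record, its depth-D cell if it exists and matches a
  have hA : (pvOccA fl).filter (fun x => x.1 == a) =
      (PySem.List.enumerate fl).flatMap (fun e =>
        if D < pvLen e.2 ∧ ((pvCell e.1 e.2 D).1 == a) = true then [pvCell e.1 e.2 D] else []) := by
    rw [pvOccA, List.filter_flatMap]
    refine List.flatMap_congr (fun e _ => ?_)
    rw [pvRow]
    rw [pvFilter_map_single (pvCell e.1 e.2) (fun x => x.1 == a) D _ ?_ ?_]
    · by_cases hcond : D ∈ PySem.List.pyRange 1 (pvLen e.2) 1 ∧ ((pvCell e.1 e.2 D).1 == a) = true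
      · rw [if_pos hcond, if_pos ⟨(PySem.List.mem_pyRange_one.mp hcond.1).2, hcond.2⟩]
      · rw [if_neg hcond, if_neg (fun hc => hcond ⟨PySem.List.mem_pyRange_one.mpr ⟨hD1, hc.1⟩, hc.2⟩)]
    · intro d hd hp
      have hb := PySem.List.mem_pyRange_one.mp hd
      rw [hDdef]
      exact pvCell_eq_depth e.1 e.2 d a hb.1 (le_of_lt hb.2) (by simpa using hp)
    · exact List.Pairwise.imp (fun h => ne_of_lt h) (pvPyRange_pairwise 1 (pvLen e.2))
  have hmem_enum : ∀ (s : Int) (e : Int × List (String × String)),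
      e ∈ PySem.List.enumerate fl s → e.2 ∈ fl := by
    clear hA
    induction fl with
    | nil => intro s e h; simp [PySem.List.enumerate] at h
    | cons item t ih =>
        intro s e h
        rw [show PySem.List.enumerate (item :: t) s = (s, item) :: PySem.List.enumerate t (s + 1)
            from rfl, List.mem_cons] at h
        rcases h with h | h
        · subst h; exact List.mem_cons_self
        · exact List.mem_cons_of_mem _ (ih (s + 1) e h)
  have hB : (pvOccB fl).filter (fun x => x.1 == a) =
      if D ∈ PySem.List.pyRange 1 (pvMaxLen fl) 1 then
        (PySem.List.enumerate fl).flatMap (fun e =>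
          if D < pvLen e.2 ∧ ((pvCell e.1 e.2 D).1 == a) = true then [pvCell e.1 e.2 D] else [])
      else [] := by
    rw [pvOccB, List.filter_flatMap]
    rw [List.flatMap_congr (g := fun d => if d = D then
        (PySem.List.enumerate fl).flatMap (fun e =>
          if D < pvLen e.2 ∧ ((pvCell e.1 e.2 D).1 == a) = true then [pvCell e.1 e.2 D] else [])
        else []) ?_]
    · exact pvFlatMap_single _ D _
        (List.Pairwise.imp (fun h => ne_of_lt h) (pvPyRange_pairwise 1 (pvMaxLen fl)))
    · intro d hd
      beta_reduce
      have hdb := PySem.List.mem_pyRange_one.mp hd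
      rw [pvCol, List.filter_flatMap]
      by_cases hdD : d = D
      · rw [if_pos hdD, hdD]
        refine List.flatMap_congr (fun e _ => ?_)
        by_cases hlen : D < pvLen e.2
        · rw [if_pos hlen, List.filter_cons, List.filter_nil]
          by_cases hp : ((pvCell e.1 e.2 D).1 == a) = true
          · rw [hp, if_pos rfl, if_pos ⟨hlen, rfl⟩]
          · have hpf : ((pvCell e.1 e.2 D).1 == a) = false := by
              cases h : ((pvCell e.1 e.2 D).1 == a)
              · rfl
              · exact absurd h hp
            rw [hpf, if_neg (by decide), if_neg (fun hc => by cases hc.2)]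
        · rw [if_neg hlen, List.filter_nil, if_neg (fun hc => hlen hc.1)]
      · rw [if_neg hdD]
        rw [List.flatMap_eq_nil_iff]
        intro e _
        by_cases hlen : d < pvLen e.2
        · rw [if_pos hlen, List.filter_cons, List.filter_nil]
          have hpf : ((pvCell e.1 e.2 d).1 == a) = false := by
            cases h : ((pvCell e.1 e.2 d).1 == a)
            · rfl
            · refine absurd ?_ hdD
              rw [hDdef]
              exact pvCell_eq_depth e.1 e.2 d a hdb.1 (le_of_lt hlen) (by simpa using h)
          rw [hpf, if_neg (by decide)]
        · rw [if_neg hlen, List.filter_nil]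
  rw [hA, hB]
  by_cases hmem : D ∈ PySem.List.pyRange 1 (pvMaxLen fl) 1
  · rw [if_pos hmem]
  · rw [if_neg hmem]
    have hbig : pvMaxLen fl ≤ D := by
      by_contra hc
      exact hmem (PySem.List.mem_pyRange_one.mpr ⟨hD1, by omega⟩)
    rw [List.flatMap_eq_nil_iff]
    intro e he
    rw [if_neg ?_]
    intro hc
    have := pvLen_le_maxLen fl e.2 (hmem_enum 0 e he)
    omega

theorem pvSpec_perm (fl : List (List (String × String))) :
    (pvSpecL (pvKnown0 fl) (pvOccA fl)).Perm (pvSpecL (pvKnown0 fl) (pvOccB fl)) := by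
  rw [List.perm_ext_iff_of_nodup (pvSpecL_nodup _ _) (pvSpecL_nodup _ _)]
  intro o
  rw [pvSpecL_mem, pvSpecL_mem, pvFilter_occ fl o.1]

theorem pvSpecL_sublist (occ : List pvOcc) :
    ∀ seen : PySem.Set String, (pvSpecL seen occ).Sublist occ := by
  induction occ with
  | nil => intro seen; simp [pvSpecL]
  | cons o t ih =>
      intro seen
      rw [pvSpecL]
      by_cases h : seen.contains o.1
      · rw [if_pos h]; exact (ih seen).cons o
      · rw [if_neg h]; exact (ih (seen.add o.1)).cons₂ o

theorem pvMem_row (o : pvOcc) (pos : Int) (item : List (String × String))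
    (h : o ∈ pvRow pos item) : o.2.1 = pos ∧ 1 ≤ o.2.2.1 := by
  rw [pvRow] at h
  obtain ⟨d, hd, rfl⟩ := List.mem_map.mp h
  have := PySem.List.mem_pyRange_one.mp hd
  exact ⟨rfl, this.1⟩

theorem pvMem_flat_enum (fl : List (List (String × String))) :
    ∀ (s : Int) (o : pvOcc), o ∈ (PySem.List.enumerate fl s).flatMap (fun e => pvRow e.1 e.2) →
      s ≤ o.2.1 := by
  induction fl with
  | nil => intro s o h; simp [PySem.List.enumerate] at h
  | cons item t ih =>
      intro s o h
      rw [show PySem.List.enumerate (item :: t) s = (s, item) :: PySem.List.enumerate t (s + 1)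
          from rfl, List.flatMap_cons, List.mem_append] at h
      rcases h with h | h
      · exact (pvMem_row o s item h).1 ▸ le_refl s
      · have := ih (s + 1) o h; omega

theorem pvOccA_pairwise (fl : List (List (String × String))) :
    (pvOccA fl).Pairwise (fun a b => pvKey2 a < pvKey2 b) := by
  rw [pvOccA]
  suffices h : ∀ (fl : List (List (String × String))) (s : Int),
      ((PySem.List.enumerate fl s).flatMap (fun e => pvRow e.1 e.2)).Pairwise
        (fun a b => pvKey2 a < pvKey2 b) from h fl 0
  intro fl
  induction fl with
  | nil => intro s; simp [PySem.List.enumerate]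
  | cons item t ih =>
      intro s
      rw [show PySem.List.enumerate (item :: t) s = (s, item) :: PySem.List.enumerate t (s + 1)
          from rfl, List.flatMap_cons]
      rw [List.pairwise_append]
      refine ⟨?_, ih (s + 1), ?_⟩
      · -- within one row: same pos, strictly increasing depth
        rw [pvRow]
        refine List.Pairwise.map _ ?_ (pvPyRange_pairwise 1 (pvLen item))
        intro d d' hdd
        show pvKey2 (pvCell s item d) < pvKey2 (pvCell s item d')
        show ([s, d] : List Int) < [s, d']
        exact List.Lex.cons (List.Lex.rel hdd)
      · intro a ha b hb
        have hpa := (pvMem_row a s item ha).1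
        have hpb := pvMem_flat_enum t (s + 1) b hb
        show ([a.2.1, a.2.2.1] : List Int) < [b.2.1, b.2.2.1]
        rw [hpa]
        exact List.Lex.rel (by omega)

theorem pvSpec_pairwise (fl : List (List (String × String))) :
    (pvSpecL (pvKnown0 fl) (pvOccA fl)).Pairwise (fun a b => pvKey2 a < pvKey2 b) :=
  List.Pairwise.sublist (pvSpecL_sublist (pvOccA fl) (pvKnown0 fl)) (pvOccA_pairwise fl)

-- ===== VERDICT (by name: the statement is the Claim_ definition above) =====
theorem repair_orphans_spec : Claim_equal_repair_orphans := by
  intro fl _ _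
  unfold Spec_repair_orphans
  have hs : PySem.List.sorted (pvSpecL (pvKnown0 fl) (pvOccB fl)) pvKey2 false =
      pvSpecL (pvKnown0 fl) (pvOccA fl) := by
    have h := PySem.List.sorted_eq_of_perm_of_pairwise_lt _ _ pvKey2 (pvSpec_perm fl) (pvSpec_pairwise fl)
    convert h using 2
  rw [pvA_norm, pvB_norm, hs]
  have hne : (pvSpecL (pvKnown0 fl) (pvOccA fl) = []) ↔ (pvSpecL (pvKnown0 fl) (pvOccB fl) = []) := by
    constructor
    · intro h; have := pvSpec_perm fl; rw [h] at this; exact this.nil_eq.symm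
    · intro h; have := pvSpec_perm fl; rw [h] at this; exact this.eq_nil
  by_cases h : pvSpecL (pvKnown0 fl) (pvOccA fl) = []
  · rw [if_pos h, if_pos (hne.mp h)]
  · rw [if_neg h, if_neg (fun hc => h (hne.mpr hc))]
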